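-- pv_equiv track=rewrite | github.com/kyangwi/GraphRag | core/main_with_llmgraphtranformer.py | sanitize_type
-- ===== SOURCE A (Python) =====
-- def sanitize_type(type_name: str) -> str:
--     """Sanitize type names to be valid Neo4j labels/relationship types"""
--     # Replace spaces and special characters with underscores
--     sanitized = type_name.replace(" ", "_").replace("-", "_")
--     # Remove any other special characters and keep only alphanumeric and underscores
--     sanitized = ''.join(c if c.isalnum() or c == '_' else '_' for c in sanitized)
--     # Remove consecutive underscores and strip leading/trailing underscores
--     while '__' in sanitized:
--         sanitized = sanitized.replace('__', '_')
--     sanitized = sanitized.strip('_')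
--     # Ensure it starts with a letter (Neo4j requirement)
--     if sanitized and not sanitized[0].isalpha():
--         sanitized = 'Node_' + sanitized
--     # Fallback if empty
--     return sanitized if sanitized else 'UnknownType'
-- ===== SOURCE B (Python) =====
-- def sanitize_type(type_name: str) -> str:
--     """Sanitize type names to be valid Neo4j labels/relationship types.
--
--     Single pass: map each char to itself if alphanumeric or underscore, else to an underscore,
--     collapsing runs of underscores as we go; then strip underscores and apply the same
--     prefix-and-fallback rules as A.
--     """
--     out = []
--     prev_us = False
--     for c in type_name:
--         mc = c if c.isalnum() or c == '_' else '_'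
--         if mc == '_':
--             if not prev_us:
--                 out.append('_')
--             prev_us = True
--         else:
--             out.append(mc)
--             prev_us = False
--     s = ''.join(out).strip('_')
--     if s and not s[0].isalpha():
--         s = 'Node_' + s
--     return s if s else 'UnknownType'
-- ===== Notes on version B (the rewrite author's own statement) =====
-- stated objective: alternative
-- what changed: Replaced A's two pre-substitution passes and its repeated whole-string double-underscore replacement loop with a single left-to-right pass that maps each character and collapses underscore runs on the fly via a boolean flag.
import Mathlib
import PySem

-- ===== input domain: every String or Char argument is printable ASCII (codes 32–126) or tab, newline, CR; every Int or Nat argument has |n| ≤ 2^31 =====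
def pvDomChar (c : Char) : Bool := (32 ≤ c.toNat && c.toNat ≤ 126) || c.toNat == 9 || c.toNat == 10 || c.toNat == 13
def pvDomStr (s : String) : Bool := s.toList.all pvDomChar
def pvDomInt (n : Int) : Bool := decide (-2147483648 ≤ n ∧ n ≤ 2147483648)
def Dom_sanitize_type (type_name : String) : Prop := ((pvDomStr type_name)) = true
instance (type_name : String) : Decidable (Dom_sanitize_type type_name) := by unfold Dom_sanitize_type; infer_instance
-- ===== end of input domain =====

-- B replaces A's two pre-replace passes and the repeated replace('__','_') fixpoint loop
-- by one left-to-right pass collapsing underscore runs with a flag; same return value.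

-- ===== PORT A =====
-- the 'while "__" in sanitized' loop; the fuel only makes it total (each iteration strictly
-- shortens the string, so s.length steps always suffice — proved below, not assumed)
def sanitizeTypeWhile : Nat → List Char → List Char
  | 0, s => s
  | fuel+1, s =>
    if PySem.Chars.isIn ['_', '_'] s then
      sanitizeTypeWhile fuel (PySem.Chars.replace s ['_', '_'] ['_'])
    else s

def sanitize_type (type_name : String) : String :=
  let s1 := PySem.Chars.replace type_name.toList [' '] ['_']
  let s2 := PySem.Chars.replace s1 ['-'] ['_']
  let s3 := s2.map (fun c => if PySem.Chars.isalnum c || c == '_' then c else '_')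
  let s4 := sanitizeTypeWhile s3.length s3
  let s5 := PySem.Chars.stripChars s4 ['_']
  let s6 := match s5 with
    | [] => s5
    | c :: _ => if PySem.Chars.isalpha c = false then "Node_".toList ++ s5 else s5
  if s6.isEmpty then "UnknownType" else String.mk s6

-- ===== PORT B =====
-- the body of B's for-loop: map the char, append unless it is an underscore
-- following another underscore (st = (out, prev_us))
def bStep (st : List Char × Bool) (c : Char) : List Char × Bool :=
  let mc := if PySem.Chars.isalnum c || c == '_' then c else '_'
  if mc = '_' then
    (if st.2 then st.1 else st.1 ++ ['_'], true)
  else (st.1 ++ [mc], false)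

def sanitize_type_alt (type_name : String) : String :=
  let st := type_name.toList.foldl bStep ([], false)
  let s := PySem.Chars.stripChars st.1 ['_']
  let s2 := match s with
    | [] => s
    | c :: _ => if PySem.Chars.isalpha c = false then "Node_".toList ++ s else s
  if s2.isEmpty then "UnknownType" else String.mk s2

-- ===== PRECONDITION & SPEC =====
def Spec_sanitize_type (type_name : String) (out : String) : Prop := out = sanitize_type_alt type_name
instance (type_name : String) (out : String) : Decidable (Spec_sanitize_type type_name out) := by unfold Spec_sanitize_type; infer_instance

-- ===== CLAIM (what is proved, stated in full; the proofs are below) =====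
def Claim_equal_sanitize_type : Prop := ∀ (type_name : String), Dom_sanitize_type type_name → Spec_sanitize_type type_name (sanitize_type type_name)

-- ===== LEMMAS AND PROOFS =====

-- the per-character sanitizer both programs apply
def pvM (c : Char) : Char := if PySem.Chars.isalnum c || c == '_' then c else '_'

-- collapse every run of '_' to a single '_' (the common normal form)
def pvSq : List Char → List Char
  | [] => []
  | c :: t => if c = '_' ∧ t.head? = some '_' then pvSq t else c :: pvSq t

-- one pass of str.replace('__','_'): greedy non-overlapping pairing from the left
def pvRep2 : List Char → List Char
  | [] => []
  | c :: t => if c = '_' ∧ t.head? = some '_' then '_' :: pvRep2 t.tail else c :: pvRep2 t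
termination_by l => l.length
decreasing_by all_goals (simp [List.length_tail]; try omega)

-- pvSq after dropping a leading underscore run (B's state with prev_us = True)
def pvSqT (l : List Char) : List Char := pvSq (l.dropWhile (fun c => c = '_'))

lemma bStep_eq (st : List Char × Bool) (c : Char) :
    bStep st c = if pvM c = '_' then ((if st.2 then st.1 else st.1 ++ ['_']), true)
                 else (st.1 ++ [pvM c], false) := rfl

lemma pv_go_single (a b : Char) (fuel : Nat) : ∀ l acc : List Char, l.length ≤ fuel →
    PySem.Chars.replace.go [a] [b] fuel l acc
      = acc.reverse ++ l.map (fun c => if c = a then b else c) := by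
  induction fuel with
  | zero =>
    intro l acc h
    cases l with
    | nil => simp [PySem.Chars.replace.go]
    | cons c t => simp at h
  | succ n ih =>
    intro l acc h
    cases l with
    | nil => simp [PySem.Chars.replace.go]
    | cons c t =>
      have hpre : [a].isPrefixOf (c :: t) = (a == c) := by simp [List.isPrefixOf]
      by_cases hc : c = a
      · subst hc
        simp only [PySem.Chars.replace.go, hpre, BEq.rfl, if_pos]
        rw [ih _ _ (by simpa using Nat.le_of_succ_le_succ h)]
        simp
      · have hne : (a == c) = false := by simp; exact fun hh => hc hh.symm
        simp only [PySem.Chars.replace.go, hpre, hne, Bool.false_eq_true, if_neg,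
          not_false_eq_true]
        rw [ih _ _ (by simpa using Nat.le_of_succ_le_succ h)]
        simp [hc]

lemma pv_replace_single (a b : Char) (l : List Char) :
    PySem.Chars.replace l [a] [b] = l.map (fun c => if c = a then b else c) := by
  simp [PySem.Chars.replace, pv_go_single a b l.length l [] le_rfl]

lemma pv_go_pair (fuel : Nat) : ∀ l acc : List Char, l.length ≤ fuel →
    PySem.Chars.replace.go ['_', '_'] ['_'] fuel l acc = acc.reverse ++ pvRep2 l := by
  induction fuel with
  | zero =>
    intro l acc h
    cases l with
    | nil => simp [PySem.Chars.replace.go, pvRep2]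
    | cons c t => simp at h
  | succ n ih =>
    intro l acc h
    cases l with
    | nil => simp [PySem.Chars.replace.go, pvRep2]
    | cons c t =>
      by_cases hcond : c = '_' ∧ t.head? = some '_'
      · obtain ⟨hc, hh⟩ := hcond
        subst hc
        cases t with
        | nil => simp at hh
        | cons d t' =>
          have hd : d = '_' := by simpa using hh
          subst hd
          have hpre : (['_', '_'].isPrefixOf ('_' :: '_' :: t')) = true := by
            simp [List.isPrefixOf]
          simp only [PySem.Chars.replace.go, hpre, if_pos]
          have ht' : t'.length ≤ n := by simp at h; omega
          rw [show List.drop (['_', '_'] : List Char).length ('_' :: '_' :: t') = t' from rfl]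
          rw [show (['_'] : List Char).reverse ++ acc = '_' :: acc from by simp]
          rw [ih t' ('_' :: acc) ht']
          rw [pvRep2, if_pos ⟨rfl, rfl⟩]
          simp
      · have hpre : (['_', '_'].isPrefixOf (c :: t)) = false := by
          cases t with
          | nil => simp [List.isPrefixOf]
          | cons d t' =>
            simp only [List.head?_cons, Option.some.injEq] at hcond
            rw [Bool.eq_false_iff]
            intro hT
            simp only [List.isPrefixOf, Bool.and_eq_true, beq_iff_eq] at hT
            exact hcond ⟨hT.1.symm, hT.2.1.symm⟩
        simp only [PySem.Chars.replace.go, hpre]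
        rw [if_neg (by simp)]
        rw [ih t (c :: acc) (by simp at h; omega)]
        rw [pvRep2, if_neg hcond]
        simp

lemma pv_replace_pair (l : List Char) :
    PySem.Chars.replace l ['_', '_'] ['_'] = pvRep2 l := by
  simp [PySem.Chars.replace, pv_go_pair l.length l [] le_rfl]

lemma pvSq_cons_ne {c : Char} (x : List Char) (hc : c ≠ '_') : pvSq (c :: x) = c :: pvSq x := by
  rw [pvSq, if_neg (by simp [hc])]

lemma pvSq_us (x : List Char) : pvSq ('_' :: x) = '_' :: pvSqT x := by
  induction x with
  | nil => simp [pvSq, pvSqT]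
  | cons d x' ih =>
    by_cases hd : d = '_'
    · subst hd
      rw [show pvSq ('_' :: '_' :: x') = pvSq ('_' :: x') from by rw [pvSq]; simp, ih]
      simp [pvSqT, List.dropWhile]
    · rw [show pvSq ('_' :: d :: x') = '_' :: pvSq (d :: x') from by
        rw [pvSq, if_neg (by simp [hd])]]
      simp [pvSqT, List.dropWhile, hd]

lemma pvSqT_us (x : List Char) : pvSqT ('_' :: x) = pvSqT x := by
  simp [pvSqT, List.dropWhile]

lemma pvSqT_cons_ne {c : Char} (x : List Char) (hc : c ≠ '_') : pvSqT (c :: x) = pvSq (c :: x) := by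
  simp [pvSqT, List.dropWhile, hc]

lemma pvSq_rep_cons (k : Nat) (t : List Char) :
    pvSq (List.replicate (k+1) '_' ++ t) = pvSq ('_' :: t) := by
  induction k with
  | zero => simp
  | succ k ih =>
    rw [show List.replicate (k+1+1) '_' ++ t = '_' :: (List.replicate (k+1) '_' ++ t) from by
      simp [List.replicate_succ]]
    rw [show pvSq ('_' :: (List.replicate (k+1) '_' ++ t)) = pvSq (List.replicate (k+1) '_' ++ t) from by
      rw [pvSq]; simp [List.replicate_succ]]
    exact ih

lemma pvRep2_rep (k : Nat) (t : List Char) (h : t.head? ≠ some '_') :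
    pvRep2 (List.replicate k '_' ++ t) = List.replicate ((k+1)/2) '_' ++ pvRep2 t := by
  induction k using Nat.twoStepInduction with
  | zero => simp
  | one =>
    rw [show List.replicate 1 '_' ++ t = '_' :: t from by simp, pvRep2, if_neg (by simp [h])]
    simp
  | more k ih _ =>
    rw [show List.replicate (k+2) '_' ++ t = '_' :: '_' :: (List.replicate k '_' ++ t) from by
      simp [List.replicate_succ]]
    rw [pvRep2, if_pos ⟨rfl, rfl⟩]
    simp only [List.tail_cons]
    rw [ih]
    rw [show (k+2+1)/2 = (k+1)/2 + 1 from by omega, List.replicate_succ]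
    simp

lemma pv_decomp (l : List Char) :
    ∃ k t, l = List.replicate k '_' ++ t ∧ t.head? ≠ some '_' := by
  induction l with
  | nil => exact ⟨0, [], rfl, by simp⟩
  | cons c t ih =>
    by_cases hc : c = '_'
    · obtain ⟨k, t', ht, hh⟩ := ih
      exact ⟨k+1, t', by simp [List.replicate_succ, hc, ht], hh⟩
    · exact ⟨0, c :: t, rfl, by simpa using hc⟩

lemma pvSq_rep_all (m : Nat) : pvSq (List.replicate (m+1) '_') = ['_'] := by
  have := pvSq_rep_cons m []
  simpa [pvSq] using this

lemma pvSq_pvRep2_aux (n : Nat) : ∀ l : List Char, l.length ≤ n → pvSq (pvRep2 l) = pvSq l := by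
  induction n with
  | zero =>
    intro l h
    have : l = [] := by cases l <;> simp_all
    subst this; rw [pvRep2]
  | succ n ih =>
    intro l h
    obtain ⟨k, t, rfl, hh⟩ := pv_decomp l
    cases t with
    | nil =>
      cases k with
      | zero => rw [show (List.replicate 0 '_' ++ [] : List Char) = [] from rfl, pvRep2]
      | succ k' =>
        rw [pvRep2_rep _ _ (by simp)]
        simp only [pvRep2, List.append_nil]
        obtain ⟨j, hj⟩ : ∃ j, (k'+1+1)/2 = j+1 := ⟨(k'+1+1)/2 - 1, by omega⟩
        rw [hj, pvSq_rep_all, pvSq_rep_all]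
    | cons c t' =>
      have hc : c ≠ '_' := by simpa using hh
      have hr : pvRep2 (c :: t') = c :: pvRep2 t' := by
        rw [pvRep2, if_neg (by simp [hc])]
      have hlen : t'.length ≤ n := by
        simp [List.length_append] at h; omega
      cases k with
      | zero =>
        simp only [List.replicate, List.nil_append]
        rw [hr, pvSq_cons_ne _ hc, pvSq_cons_ne _ hc, ih t' hlen]
      | succ k' =>
        rw [pvRep2_rep _ _ hh, hr]
        obtain ⟨j, hj⟩ : ∃ j, (k'+1+1)/2 = j+1 := ⟨(k'+1+1)/2 - 1, by omega⟩
        rw [hj, pvSq_rep_cons, pvSq_rep_cons]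
        rw [show pvSq ('_' :: c :: pvRep2 t') = '_' :: pvSq (c :: pvRep2 t') from by
          rw [pvSq, if_neg (by simp [hc])]]
        rw [show pvSq ('_' :: c :: t') = '_' :: pvSq (c :: t') from by
          rw [pvSq, if_neg (by simp [hc])]]
        rw [pvSq_cons_ne _ hc, pvSq_cons_ne _ hc, ih t' hlen]

lemma pvSq_pvRep2 (l : List Char) : pvSq (pvRep2 l) = pvSq l :=
  pvSq_pvRep2_aux l.length l le_rfl

lemma pvSq_no_pair (l : List Char) (h : ¬ ['_', '_'] <:+: l) : pvSq l = l := by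
  induction l with
  | nil => rfl
  | cons c t ih =>
    by_cases hcond : c = '_' ∧ t.head? = some '_'
    · exfalso
      obtain ⟨hc, hhd⟩ := hcond
      subst hc
      cases t with
      | nil => simp at hhd
      | cons d t' =>
        have hd : d = '_' := by simpa using hhd
        subst hd
        exact h (List.IsPrefix.isInfix ⟨t', rfl⟩)
    · rw [pvSq, if_neg hcond]
      rw [ih (fun hinf => h (hinf.trans (List.suffix_cons c t).isInfix))]

lemma pvRep2_length_le (l : List Char) : (pvRep2 l).length ≤ l.length := by
  induction l using pvRep2.induct with
  | case1 => simp [pvRep2]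
  | case2 c t hcond ih =>
    rw [pvRep2, if_pos hcond]
    have : t.tail.length ≤ t.length := by simp [List.length_tail]
    simp; omega
  | case3 c t hcond ih =>
    rw [pvRep2, if_neg hcond]
    simpa using ih

lemma pvRep2_length_lt (l : List Char) (h : ['_', '_'] <:+: l) :
    (pvRep2 l).length < l.length := by
  induction l with
  | nil => simp at h
  | cons c t ih =>
    by_cases hcond : c = '_' ∧ t.head? = some '_'
    · rw [pvRep2, if_pos hcond]
      obtain ⟨_, hhd⟩ := hcond
      have hne : t ≠ [] := by cases t <;> simp_all
      have h1 := pvRep2_length_le t.tail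
      have h2 : t.tail.length + 1 = t.length := by
        cases t with
        | nil => exact absurd rfl hne
        | cons d t' => simp
      simp; omega
    · rw [pvRep2, if_neg hcond]
      rcases List.infix_cons_iff.mp h with hpre | hinf
      · exfalso
        apply hcond
        obtain ⟨r, hr⟩ := hpre
        cases t with
        | nil => simp at hr
        | cons d t' =>
          simp at hr
          exact ⟨hr.1.symm, by simp [hr.2.1.symm]⟩
      · simpa using ih hinf

lemma pv_while_eq_sq (fuel : Nat) : ∀ l : List Char, l.length ≤ fuel →
    sanitizeTypeWhile fuel l = pvSq l := by
  induction fuel with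
  | zero =>
    intro l h
    have : l = [] := by cases l <;> simp_all
    subst this; rfl
  | succ n ih =>
    intro l h
    rw [sanitizeTypeWhile]
    by_cases hin : PySem.Chars.isIn ['_', '_'] l = true
    · have hinf : ['_', '_'] <:+: l := (PySem.Chars.isIn_iff_infix _ _).mp hin
      rw [if_pos hin, pv_replace_pair]
      rw [ih (pvRep2 l) (by have := pvRep2_length_lt l hinf; omega)]
      exact pvSq_pvRep2 l
    · rw [if_neg hin]
      exact (pvSq_no_pair l ((PySem.Chars.isIn_eq_false_iff _ _).mp (by simpa using hin))).symm

lemma pv_fold_eq_sq (l : List Char) : ∀ acc : List Char,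
    ((l.foldl bStep (acc, false)).1 = acc ++ pvSq (l.map pvM))
    ∧ ((l.foldl bStep (acc, true)).1 = acc ++ pvSqT (l.map pvM)) := by
  induction l with
  | nil => intro acc; simp [pvSq, pvSqT]
  | cons c t ih =>
    intro acc
    by_cases hm : pvM c = '_'
    · constructor
      · have h2 := (ih (acc ++ ['_'])).2
        rw [List.foldl_cons, bStep_eq]
        simp [hm, h2, pvSq_us]
      · have h2 := (ih acc).2
        rw [List.foldl_cons, bStep_eq]
        simp [hm, h2, pvSqT_us]
    · constructor
      · have h1 := (ih (acc ++ [pvM c])).1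
        rw [List.foldl_cons, bStep_eq]
        simp [hm, h1, pvSq_cons_ne _ hm]
      · have h1 := (ih (acc ++ [pvM c])).1
        rw [List.foldl_cons, bStep_eq]
        simp [hm, h1, pvSqT_cons_ne _ hm, pvSq_cons_ne _ hm]

lemma pv_maps_collapse (l : List Char) :
    ((PySem.Chars.replace (PySem.Chars.replace l [' '] ['_']) ['-'] ['_']).map
        (fun c => if PySem.Chars.isalnum c || c == '_' then c else '_'))
      = l.map pvM := by
  rw [pv_replace_single, pv_replace_single, List.map_map, List.map_map]
  refine List.map_congr_left (fun c _ => ?_)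
  by_cases h1 : c = ' '
  · subst h1; decide
  · by_cases h2 : c = '-'
    · subst h2; decide
    · simp [Function.comp, h1, h2, pvM]

-- ===== VERDICT (by name: the statement is the Claim_ definition above) =====
theorem sanitize_type_spec : Claim_equal_sanitize_type := by
  intro t _
  unfold Spec_sanitize_type
  simp only [sanitize_type, sanitize_type_alt]
  rw [pv_maps_collapse]
  rw [pv_while_eq_sq ((t.toList.map pvM).length) _ le_rfl]
  rw [show (t.toList.foldl bStep ([], false)).1 = pvSq (t.toList.map pvM) from by
    simpa using (pv_fold_eq_sq t.toList []).1]
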